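-- pv_equiv track=rewrite | github.com/kazkitou/exercise_python_it | sampleproject/www/Project_Euler/problem001_050/problem034.py | get_num_kaijo_special
-- ===== SOURCE A (Python) =====
-- def get_num_kaijo_special(num: int) -> int:
--     """
--     引数numの階乗の値を返す
--     """
--     kaijo = 1
--     # 0! = 1
--     if num == 0:
--         return 1
--     # 引数numが1桁でない場合は異常値とみなす。
--     if num < 1 or num > 9:
--         return 0
--     for i in range(num, 0, -1):
--         kaijo *= i
--     return kaijo
-- ===== SOURCE B (Python) =====
-- def get_num_kaijo_special(num: int) -> int:
--     if num == 0:
--         return 1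
--     if num < 1 or num > 9:
--         return 0
--
--     def fact(n: int) -> int:
--         return 1 if n <= 1 else n * fact(n - 1)
--
--     return fact(num)
-- ===== Notes on version B (the rewrite author's own statement) =====
-- stated objective: alternative
-- what changed: The descending accumulator loop is replaced by a recursive factorial helper that walks num down to the base case; the top guards are unchanged.
import Mathlib
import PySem

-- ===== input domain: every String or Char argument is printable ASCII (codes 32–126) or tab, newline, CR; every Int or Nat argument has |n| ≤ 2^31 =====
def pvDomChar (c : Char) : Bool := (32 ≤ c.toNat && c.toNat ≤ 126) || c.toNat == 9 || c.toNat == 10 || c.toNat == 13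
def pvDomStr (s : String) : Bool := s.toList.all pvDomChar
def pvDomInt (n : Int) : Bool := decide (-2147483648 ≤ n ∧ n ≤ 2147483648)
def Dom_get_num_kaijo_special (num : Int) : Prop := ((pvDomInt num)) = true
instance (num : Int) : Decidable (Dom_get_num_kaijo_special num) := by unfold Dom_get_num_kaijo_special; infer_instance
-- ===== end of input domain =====

-- ===== PORT A =====
-- B replaces the descending accumulator loop with a recursive factorial helper (alternative decomposition).
def get_num_kaijo_special (num : Int) : Int :=
  if num = 0 then 1
  else if num < 1 ∨ num > 9 then 0
  else (PySem.List.pyRange num 0 (-1)).foldl (fun kaijo i => kaijo * i) 1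

-- ===== PORT B =====
def pvFactB (n : Nat) : Int :=
  if n ≤ 1 then 1 else (n : Int) * pvFactB (n - 1)

def get_num_kaijo_special_alt (num : Int) : Int :=
  if num = 0 then 1
  else if num < 1 ∨ num > 9 then 0
  else pvFactB num.toNat

-- ===== PRECONDITION & SPEC =====
def Spec_get_num_kaijo_special (num : Int) (out : Int) : Prop := out = get_num_kaijo_special_alt num
instance (num : Int) (out : Int) : Decidable (Spec_get_num_kaijo_special num out) := by unfold Spec_get_num_kaijo_special; infer_instance

-- ===== CLAIM (what is proved, stated in full; the proofs are below) =====
def Claim_equal_get_num_kaijo_special : Prop := ∀ (num : Int), Dom_get_num_kaijo_special num → Spec_get_num_kaijo_special num (get_num_kaijo_special num)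

-- ===== LEMMAS AND PROOFS =====

-- ===== VERDICT (by name: the statement is the Claim_ definition above) =====
theorem get_num_kaijo_special_spec : Claim_equal_get_num_kaijo_special := by
  intro num _
  unfold Spec_get_num_kaijo_special get_num_kaijo_special get_num_kaijo_special_alt
  split_ifs with h0 hr
  · rfl
  · rfl
  · push Not at hr
    obtain ⟨h1, h9⟩ := hr
    interval_cases num <;> simp [PySem.List.pyRange, pvFactB, List.range_succ]
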